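-- pv_equiv track=rewrite | github.com/PauraviW/leetcode-problems | Amazon SDE 1/Transaction logs.py | processLogFile
-- ===== SOURCE A (Python) =====
-- from collections import defaultdict
--
-- def processLogFile(logs, threshold):
--     """
--     :type logs: List[str]
--     :type threshold: int
--     :rtype: List[str]
--     """
--
--     logDict = defaultdict(int)
--     ans = set()
--     for i in range(len(logs)):
--         fro, to, _ = logs[i].split(' ')
--         if fro != to:
--             logDict[to] += 1
--             if logDict[to] >= threshold:
--                 ans.add(to)
--         logDict[fro] += 1
--         if logDict[fro] >= threshold:
--             ans.add(fro)
--     return sorted(ans)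
-- ===== SOURCE B (Python) =====
-- def processLogFile(logs, threshold):
--     # Flatten the logs into one token list (sender always, recipient only when
--     # different), sort it, then scan the sorted tokens for runs of length >= threshold.
--     tokens = []
--     for log in logs:
--         fro, to, _ = log.split(' ')
--         tokens.append(fro)
--         if fro != to:
--             tokens.append(to)
--     tokens.sort()
--     ans = []
--     i = 0
--     n = len(tokens)
--     while i < n:
--         j = i + 1
--         while j < n and tokens[j] == tokens[i]:
--             j += 1
--         if j - i >= threshold:
--             ans.append(tokens[i])
--         i = j
--     return ans
-- ===== Notes on version B (the rewrite author's own statement) =====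
-- stated objective: alternative
-- what changed: Replaces A's hash-counter with eagerly maintained answer set by a sort-then-scan algorithm: flatten the logs into a token list (sender, plus recipient when different), sort the tokens, and emit each id whose run length reaches the threshold; no dictionary and no set are used.
import Mathlib
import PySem

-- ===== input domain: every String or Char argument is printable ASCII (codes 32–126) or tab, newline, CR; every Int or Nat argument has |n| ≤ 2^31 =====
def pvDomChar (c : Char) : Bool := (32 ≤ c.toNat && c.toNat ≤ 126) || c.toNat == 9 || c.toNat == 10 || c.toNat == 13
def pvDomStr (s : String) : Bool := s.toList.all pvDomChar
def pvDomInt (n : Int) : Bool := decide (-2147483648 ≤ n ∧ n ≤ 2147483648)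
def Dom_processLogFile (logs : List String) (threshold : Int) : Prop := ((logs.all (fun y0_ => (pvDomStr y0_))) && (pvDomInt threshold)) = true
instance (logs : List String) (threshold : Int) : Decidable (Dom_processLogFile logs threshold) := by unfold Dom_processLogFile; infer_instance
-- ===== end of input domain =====

-- B replaces A's dict-counter-with-eager-answer-set by sort-then-scan over the flattened token list (objective: alternative).


-- ===== PORT A =====
-- loop body of A for an unpacked line: 'if fro != to: logDict[to] += 1; …; logDict[fro] += 1; …'
def pvBodyA (threshold : Int) (st : PySem.Dict String Int × PySem.Set String)
    (fro tgt : String) : PySem.Dict String Int × PySem.Set String :=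
  let st' :=
    if fro ≠ tgt then
      let d := st.1.modify tgt 0 (· + 1)
      (d, if threshold ≤ d.getD tgt 0 then st.2.add tgt else st.2)
    else st
  let d := st'.1.modify fro 0 (· + 1)
  (d, if threshold ≤ d.getD fro 0 then st'.2.add fro else st'.2)

-- 'fro, to, _ = logs[i].split(' ')' then the body above
-- (on a line whose split is not exactly 3 parts Python raises ValueError — excluded by Pre_ — and the port leaves the state unchanged)
def pvStepA (threshold : Int) (st : PySem.Dict String Int × PySem.Set String) (line : String) :
    PySem.Dict String Int × PySem.Set String :=
  match PySem.Str.split? line " " with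
  | some [fro, tgt, _] => pvBodyA threshold st fro tgt
  | _ => st

def processLogFile (logs : List String) (threshold : Int) : List String :=
  let st := (PySem.List.pyRange 0 (PySem.List.len logs)).foldl
      (fun st i => pvStepA threshold st (PySem.List.pyGetD logs i "")) (PySem.Dict.empty, PySem.Set.empty)
  PySem.List.sorted st.2 (fun x => x)

-- ===== PORT B =====
-- B's first loop: 'tokens.append(fro); if fro != to: tokens.append(to)'
def pvTokStep (toks : List String) (line : String) : List String :=
  match PySem.Str.split? line " " with
  | some [fro, tgt, _] => (toks ++ [fro]) ++ (if fro ≠ tgt then [tgt] else [])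
  | _ => toks

-- B's scan over the sorted token list: the outer 'while i < n' advances past one run of equal
-- tokens per iteration (the inner 'while j < n and tokens[j] == tokens[i]' measures the run);
-- ported as structural recursion, one step per run: the run is takeWhile (== head), the loop
-- continues on dropWhile (== head); exact for the index-based Python loops.
def pvScan (threshold : Int) : List String → List String
  | [] => []
  | x :: rest =>
    let run := rest.takeWhile (fun y => y == x)
    let rest' := rest.dropWhile (fun y => y == x)
    if threshold ≤ (1 + run.length : Int) then x :: pvScan threshold rest'
    else pvScan threshold rest'
termination_by l => l.length
decreasing_by all_goals simpa using Nat.lt_succ_of_le (List.length_dropWhile_le _ _)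

def processLogFile_alt (logs : List String) (threshold : Int) : List String :=
  let tokens := logs.foldl pvTokStep []
  pvScan threshold (PySem.List.sorted tokens (fun x => x))

-- ===== PRECONDITION & SPEC =====
-- Pre_ excludes exactly the inputs where A raises: a log line whose split on ' ' does not have exactly
-- 3 parts makes the unpacking 'fro, to, _ = …' raise ValueError (B raises there too).
def Pre_processLogFile (logs : List String) (threshold : Int) : Prop :=
  ∀ s ∈ logs, ((PySem.Str.split? s " ").getD []).length = 3
instance (logs : List String) (threshold : Int) : Decidable (Pre_processLogFile logs threshold) := by
  unfold Pre_processLogFile; infer_instance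
def pvWitness_processLogFile : List String × Int := (["a b x", "b a y", "a c z"], 2)
def Spec_processLogFile (logs : List String) (threshold : Int) (out : List String) : Prop := out = processLogFile_alt logs threshold
instance (logs : List String) (threshold : Int) (out : List String) : Decidable (Spec_processLogFile logs threshold out) := by unfold Spec_processLogFile; infer_instance

-- ===== CLAIM (what is proved, stated in full; the proofs are below) =====
def Claim_equal_processLogFile : Prop := ∀ (logs : List String) (threshold : Int), Dom_processLogFile logs threshold → Pre_processLogFile logs threshold → Spec_processLogFile logs threshold (processLogFile logs threshold)

-- ===== LEMMAS AND PROOFS =====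

-- Invariant of A's loop: the dict holds the multiplicity of each id in the token multiset
-- built so far, and the answer set holds exactly the ids whose multiplicity reached threshold.
def pvInvA (threshold : Int) (dA : PySem.Dict String Int) (ans : PySem.Set String)
    (toks : List String) : Prop :=
  ans.Nodup ∧
  (∀ x, dA.getD x 0 = (toks.count x : Int)) ∧
  (∀ x, x ∈ ans ↔ (x ∈ toks ∧ threshold ≤ (toks.count x : Int)))

theorem pvCount_append_one (x fro : String) (toks : List String) :
    (toks ++ [fro]).count x = toks.count x + (if x = fro then 1 else 0) := by
  rw [List.count_append]
  by_cases hx : x = fro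
  · simp [hx]
  · have h0 : List.count x [fro] = 0 := List.count_eq_zero.mpr (by simp [hx])
    rw [h0, if_neg hx]

theorem pvSet_mem_add_thr (threshold c : Int) (ans : PySem.Set String) (u x : String) :
    (x ∈ if threshold ≤ c + 1 then ans.add u else ans) ↔
      (x ∈ ans ∨ (x = u ∧ threshold ≤ c + 1)) := by
  split_ifs with h1
  · rw [PySem.Set.mem_add]
    tauto
  · constructor
    · exact Or.inl
    · rintro (h' | ⟨-, h'⟩)
      · exact h'
      · exact absurd h' h1

theorem pvInvA_body (threshold : Int) (dA : PySem.Dict String Int) (ans : PySem.Set String)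
    (toks : List String) (fro tgt : String)
    (h : pvInvA threshold dA ans toks) :
    pvInvA threshold (pvBodyA threshold (dA, ans) fro tgt).1 (pvBodyA threshold (dA, ans) fro tgt).2
      ((toks ++ [fro]) ++ (if fro ≠ tgt then [tgt] else [])) := by
  obtain ⟨hnd, hg, hm⟩ := h
  unfold pvBodyA
  by_cases hft : fro = tgt
  · rw [if_neg (fun hc : fro ≠ tgt => hc hft), if_neg (fun hc : fro ≠ tgt => hc hft),
      List.append_nil]
    dsimp only
    have hgself : (dA.modify fro 0 (· + 1)).getD fro 0 = (toks.count fro : Int) + 1 := by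
      rw [PySem.Dict.getD_modify_self, hg fro]
    rw [hgself]
    refine ⟨?_, ?_, ?_⟩
    · split_ifs
      · exact PySem.Set.nodup_add _ _ hnd
      · exact hnd
    · intro x
      rw [PySem.Dict.getD_modify, pvCount_append_one x fro toks]
      by_cases hx : x = fro <;> simp [hx, hg x, hg fro]
    · intro x
      rw [pvSet_mem_add_thr threshold _ ans fro x, hm x, pvCount_append_one x fro toks]
      have hmmem : x ∈ toks ++ [fro] ↔ (x ∈ toks ∨ x = fro) := by simp
      rw [hmmem]
      by_cases hx : x = fro
      · rw [if_pos hx]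
        have hcc : (toks.count fro : Int) = (toks.count x : Int) := by rw [hx]
        push_cast
        constructor
        · rintro (⟨-, h'⟩ | ⟨-, h'⟩)
          · exact ⟨Or.inr hx, by omega⟩
          · exact ⟨Or.inr hx, by omega⟩
        · rintro ⟨-, h'⟩
          exact Or.inr ⟨hx, by omega⟩
      · rw [if_neg hx]
        push_cast
        constructor
        · rintro (⟨h', hle⟩ | ⟨h', -⟩)
          · exact ⟨Or.inl h', by omega⟩
          · exact absurd h' hx
        · rintro ⟨h' | h', hle⟩
          · exact Or.inl ⟨h', by omega⟩
          · exact absurd h' hx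
  · rw [if_pos hft, if_pos hft]
    dsimp only
    have hg1 : ∀ x, (dA.modify tgt 0 (· + 1)).getD x 0 =
        (toks.count x : Int) + (if x = tgt then 1 else 0) := by
      intro x
      rw [PySem.Dict.getD_modify]
      by_cases hx : x = tgt <;> simp [hx, hg x, hg tgt]
    have hg2 : ∀ x, ((dA.modify tgt 0 (· + 1)).modify fro 0 (· + 1)).getD x 0 =
        (toks.count x : Int) + (if x = fro then 1 else 0) + (if x = tgt then 1 else 0) := by
      intro x
      rw [PySem.Dict.getD_modify, hg1 x, hg1 fro, if_neg hft]
      by_cases hx : x = fro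
      · rw [if_pos hx, if_pos hx, if_neg (fun hc : x = tgt => hft (hx ▸ hc)), hx]
        ring
      · rw [if_neg hx, if_neg hx]
        ring
    have hcnt : ∀ x, (((toks ++ [fro]) ++ [tgt]).count x : Int) =
        (toks.count x : Int) + (if x = fro then 1 else 0) + (if x = tgt then 1 else 0) := by
      intro x
      rw [pvCount_append_one x tgt (toks ++ [fro]), pvCount_append_one x fro toks]
      split_ifs <;> push_cast <;> ring
    have hmm : ∀ x, x ∈ (toks ++ [fro]) ++ [tgt] ↔ (x ∈ toks ∨ x = fro ∨ x = tgt) := by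
      intro x
      simp only [List.mem_append, List.mem_singleton]
      tauto
    set ans1 := (if threshold ≤ (dA.modify tgt 0 (· + 1)).getD tgt 0 then ans.add tgt else ans)
      with hans1
    have hnd1 : ans1.Nodup := by
      rw [hans1]
      split_ifs
      · exact PySem.Set.nodup_add _ _ hnd
      · exact hnd
    have hm1 : ∀ x, x ∈ ans1 ↔ (x ∈ ans ∨ (x = tgt ∧ threshold ≤ (toks.count tgt : Int) + 1)) := by
      intro x
      rw [hans1, hg1 tgt, if_pos rfl]
      exact pvSet_mem_add_thr threshold _ ans tgt x
    have hgf : ((dA.modify tgt 0 (· + 1)).modify fro 0 (· + 1)).getD fro 0 =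
        (toks.count fro : Int) + 1 := by
      rw [hg2 fro, if_pos rfl, if_neg hft]
      ring
    rw [hgf]
    refine ⟨?_, ?_, ?_⟩
    · split_ifs
      · exact PySem.Set.nodup_add _ _ hnd1
      · exact hnd1
    · intro x
      rw [hg2 x, hcnt x]
    · intro x
      rw [pvSet_mem_add_thr threshold _ ans1 fro x, hm1 x, hm x, hcnt x, hmm x]
      by_cases h1 : x = fro
      · have h2 : ¬x = tgt := fun hc => hft (h1 ▸ hc)
        rw [if_pos h1, if_neg h2, add_zero]
        have hcc : (toks.count fro : Int) = (toks.count x : Int) := by rw [h1]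
        constructor
        · rintro ((⟨h', hle⟩ | ⟨h', -⟩) | ⟨-, h'⟩)
          · exact ⟨Or.inl h', by omega⟩
          · exact absurd h' h2
          · exact ⟨Or.inr (Or.inl h1), by omega⟩
        · rintro ⟨-, h'⟩
          exact Or.inr ⟨h1, by omega⟩
      · by_cases h2 : x = tgt
        · rw [if_pos h2, if_neg h1, add_zero]
          have hcc : (toks.count tgt : Int) = (toks.count x : Int) := by rw [h2]
          constructor
          · rintro ((⟨h', hle⟩ | ⟨-, h'⟩) | ⟨h', -⟩)
            · exact ⟨Or.inl h', by omega⟩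
            · exact ⟨Or.inr (Or.inr h2), by omega⟩
            · exact absurd h' h1
          · rintro ⟨-, h'⟩
            exact Or.inl (Or.inr ⟨h2, by omega⟩)
        · rw [if_neg h1, if_neg h2, add_zero, add_zero]
          constructor
          · rintro ((⟨h', hle⟩ | ⟨h', -⟩) | ⟨h', -⟩)
            · exact ⟨Or.inl h', hle⟩
            · exact absurd h' h2
            · exact absurd h' h1
          · rintro ⟨h' | h' | h', hle⟩
            · exact Or.inl (Or.inl ⟨h', hle⟩)
            · exact absurd h' h1
            · exact absurd h' h2

theorem pvInvA_step (threshold : Int) (dA : PySem.Dict String Int) (ans : PySem.Set String)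
    (toks : List String) (line : String)
    (h : pvInvA threshold dA ans toks) :
    pvInvA threshold (pvStepA threshold (dA, ans) line).1 (pvStepA threshold (dA, ans) line).2
      (pvTokStep toks line) := by
  unfold pvStepA pvTokStep
  cases hsp : PySem.Str.split? line " " with
  | none => exact h
  | some parts =>
    match parts with
    | [] => exact h
    | [a] => exact h
    | [a, b] => exact h
    | a :: b :: c :: d :: t => exact h
    | [fro, tgt, z] => exact pvInvA_body threshold dA ans toks fro tgt h

theorem pvInvA_foldl (threshold : Int) (logs : List String)
    (dA : PySem.Dict String Int) (ans : PySem.Set String) (toks : List String)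
    (h : pvInvA threshold dA ans toks) :
    pvInvA threshold (logs.foldl (pvStepA threshold) (dA, ans)).1
      (logs.foldl (pvStepA threshold) (dA, ans)).2 (logs.foldl pvTokStep toks) := by
  induction logs generalizing dA ans toks with
  | nil => exact h
  | cons l t ih =>
    simp only [List.foldl_cons]
    have hstep := pvInvA_step threshold dA ans toks l h
    have heq : pvStepA threshold (dA, ans) l =
        ((pvStepA threshold (dA, ans) l).1, (pvStepA threshold (dA, ans) l).2) := rfl
    rw [heq]
    exact ih _ _ _ hstep

-- A's index loop over range(len(logs)) is the direct fold over logs.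
theorem pvFoldA_eq (threshold : Int) (logs : List String) :
    (PySem.List.pyRange 0 (PySem.List.len logs)).foldl
      (fun st i => pvStepA threshold st (PySem.List.pyGetD logs i ""))
      (PySem.Dict.empty, PySem.Set.empty) =
    logs.foldl (pvStepA threshold) (PySem.Dict.empty, PySem.Set.empty) := by
  conv_rhs => rw [← PySem.List.map_pyGetD_pyRange_zero logs ""]
  rw [List.foldl_map]

-- The scan over a weakly sorted list returns a strictly increasing list holding exactly the
-- ids whose multiplicity reaches threshold.
theorem pvScan_spec (threshold : Int) : ∀ (n : Nat) (l : List String), l.length ≤ n →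
    l.Pairwise (· ≤ ·) →
    (∀ y, y ∈ pvScan threshold l ↔ (y ∈ l ∧ threshold ≤ (l.count y : Int))) ∧
    (pvScan threshold l).Pairwise (· < ·) := by
  intro n
  induction n with
  | zero =>
    intro l hl _
    have hnil : l = [] := List.length_eq_zero_iff.mp (Nat.le_zero.mp hl)
    subst hnil
    exact ⟨by simp [pvScan], by simp [pvScan]⟩
  | succ n ih =>
    intro l hl hs
    match l with
    | [] => exact ⟨by simp [pvScan], by simp [pvScan]⟩
    | x :: rest =>
      have hxle : ∀ y ∈ rest, x ≤ y := (List.pairwise_cons.mp hs).1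
      have hsrest : rest.Pairwise (· ≤ ·) := (List.pairwise_cons.mp hs).2
      have hsplit : rest.takeWhile (fun y => y == x) ++ rest.dropWhile (fun y => y == x) = rest :=
        List.takeWhile_append_dropWhile
      have hruneq : ∀ y ∈ rest.takeWhile (fun y => y == x), y = x := by
        intro y hy
        exact eq_of_beq (List.mem_takeWhile_imp (p := fun y => y == x) hy)
      have hsub : List.Sublist (rest.dropWhile (fun y => y == x)) rest :=
        List.dropWhile_sublist _
      have hsrest' : (rest.dropWhile (fun y => y == x)).Pairwise (· ≤ ·) := hsrest.sublist hsub
      have hlt : ∀ y ∈ rest.dropWhile (fun y => y == x), x < y := by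
        intro y hy
        rcases hdw : rest.dropWhile (fun y => y == x) with _ | ⟨d, ds⟩
        · rw [hdw] at hy
          cases hy
        · have hne : rest.dropWhile (fun y => y == x) ≠ [] := by rw [hdw]; simp
          have hdne : d ≠ x := by
            have hh := List.head_dropWhile_not (fun y => y == x) hne
            have hhd : (rest.dropWhile (fun y => y == x)).head hne = d := by
              simp [hdw]
            rw [hhd] at hh
            simpa using hh
          have hdmem : d ∈ rest := hsub.mem (by rw [hdw]; simp)
          have hxd : x < d := lt_of_le_of_ne (hxle d hdmem) (Ne.symm hdne)
          rw [hdw] at hy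
          rcases List.mem_cons.mp hy with rfl | hy'
          · exact hxd
          · have hpw : (d :: ds).Pairwise (· ≤ ·) := hdw ▸ hsrest'
            exact lt_of_lt_of_le hxd ((List.pairwise_cons.mp hpw).1 y hy')
      have hxnotin : x ∉ rest.dropWhile (fun y => y == x) := fun hmem => lt_irrefl x (hlt x hmem)
      have hlen : (rest.dropWhile (fun y => y == x)).length ≤ n := by
        have hd := List.length_dropWhile_le (fun y => y == x) rest
        simp only [List.length_cons] at hl
        omega
      obtain ⟨ihmem, ihpw⟩ := ih (rest.dropWhile (fun y => y == x)) hlen hsrest'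
      have hcx : (x :: rest).count x = 1 + (rest.takeWhile (fun y => y == x)).length := by
        have h1 : (rest.takeWhile (fun y => y == x)).count x =
            (rest.takeWhile (fun y => y == x)).length := by
          rw [List.count_eq_length]
          intro b hb
          simp [hruneq b hb]
        have h2 : (rest.dropWhile (fun y => y == x)).count x = 0 :=
          List.count_eq_zero.mpr hxnotin
        conv_lhs => rw [← hsplit]
        rw [List.count_cons]
        rw [List.count_append, h1, h2]
        simp
        omega
      have hcy : ∀ y, y ≠ x → (x :: rest).count y = (rest.dropWhile (fun y => y == x)).count y := by
        intro y hy
        have h1 : (rest.takeWhile (fun y => y == x)).count y = 0 :=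
          List.count_eq_zero.mpr (fun hmem => hy (hruneq y hmem))
        conv_lhs => rw [← hsplit]
        rw [List.count_cons, List.count_append, h1]
        simp [Ne.symm hy]
      have hmemy : ∀ y, y ≠ x → (y ∈ x :: rest ↔ y ∈ rest.dropWhile (fun y => y == x)) := by
        intro y hy
        conv_lhs => rw [← hsplit]
        simp only [List.mem_cons, List.mem_append]
        constructor
        · rintro (h' | h' | h')
          · exact absurd h' hy
          · exact absurd (hruneq y h') hy
          · exact h'
        · intro h'
          exact Or.inr (Or.inr h')
      have hunf : pvScan threshold (x :: rest) =
          if threshold ≤ (1 + (rest.takeWhile (fun y => y == x)).length : Int)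
          then x :: pvScan threshold (rest.dropWhile (fun y => y == x))
          else pvScan threshold (rest.dropWhile (fun y => y == x)) := by
        rw [pvScan]
      constructor
      · intro y
        rw [hunf]
        by_cases hy : y = x
        · subst hy
          have hnotS : y ∉ pvScan threshold (rest.dropWhile (fun z => z == y)) :=
            fun hmem => hxnotin ((ihmem y).mp hmem).1
          rw [hcx]
          split_ifs with h1
          · constructor
            · intro _
              refine ⟨List.mem_cons_self, ?_⟩
              push_cast at h1 ⊢
              omega
            · intro _
              exact List.mem_cons_self
          · constructor
            · intro h'
              exact absurd h' hnotS
            · rintro ⟨-, h'⟩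
              exact absurd (by push_cast at h' ⊢; omega) h1
        · rw [hcy y hy, hmemy y hy, ← ihmem y]
          split_ifs with h1
          · simp [hy]
          · rfl
      · rw [hunf]
        split_ifs with h1
        · rw [List.pairwise_cons]
          exact ⟨fun y hy => hlt y ((ihmem y).mp hy).1, ihpw⟩
        · exact ihpw

theorem processLogFile_spec' (logs : List String) (threshold : Int) :
    processLogFile logs threshold = processLogFile_alt logs threshold := by
  unfold processLogFile processLogFile_alt
  rw [pvFoldA_eq]
  have hinv0 : pvInvA threshold PySem.Dict.empty PySem.Set.empty [] := by
    refine ⟨List.nodup_nil, fun x => rfl, fun x => ?_⟩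
    simp only [List.count_nil, List.not_mem_nil, false_and, iff_false]
    exact List.not_mem_nil
  obtain ⟨hnd, hg, hm⟩ := pvInvA_foldl threshold logs PySem.Dict.empty PySem.Set.empty [] hinv0
  have hLpw : (PySem.List.sorted (logs.foldl pvTokStep []) (fun x => x)).Pairwise (· ≤ ·) :=
    PySem.List.sorted_pairwise _ _
  obtain ⟨hmemS, hpwS⟩ := pvScan_spec threshold
    (PySem.List.sorted (logs.foldl pvTokStep []) (fun x => x)).length _ (le_refl _) hLpw
  have hperm : (PySem.List.sorted (logs.foldl pvTokStep []) (fun x => x)).Perm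
      (logs.foldl pvTokStep []) := PySem.List.sorted_perm _ _ _
  apply PySem.List.sorted_eq_of_perm_of_pairwise_lt
  · have hndS : (pvScan threshold (PySem.List.sorted (logs.foldl pvTokStep []) (fun x => x))).Nodup :=
      hpwS.imp (fun hlt => ne_of_lt hlt)
    rw [List.perm_ext_iff_of_nodup hndS hnd]
    intro y
    rw [hmemS y, hm y, hperm.mem_iff, hperm.count_eq y]
  · exact hpwS

-- ===== VERDICT (by name: the statement is the Claim_ definition above) =====
theorem processLogFile_spec : Claim_equal_processLogFile := by
  intro logs threshold _ _
  exact processLogFile_spec' logs threshold
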